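-- pv_equiv track=rewrite | github.com/Gyeol0/TIL | Algorithm/List_practice/4837. 부분집합의 합2.py | Sum_Subset2
-- ===== SOURCE A (Python) =====
-- def Sum_Subset2(N, k, c):
--     result = 0
--     arr = [i for i in range(1, c+1)]
--     subset = [[]]
--     for i in arr:
--         l = len(subset)
--         # 원래 있는 모든 집합에 요소로 추가로 더한 것을 append, 원래 있던 집합은 건들지 않는다.
--         for j in range(l):
--             subset.append(subset[j]+[i])
--             if len(subset[-1]) == N and sum(subset[-1]) == k:
--                 result += 1
--     return result
-- ===== SOURCE B (Python) =====
-- def Sum_Subset2(N, k, c):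
--     # DP over (number of elements chosen, running sum) instead of enumerating all 2^c subsets.
--     dp = {(0, 0): 1}
--     for i in range(1, c + 1):
--         new = dict(dp)
--         for (cnt, s), v in dp.items():
--             key = (cnt + 1, s + i)
--             new[key] = new.get(key, 0) + v
--         dp = new
--     return dp.get((N, k), 0)
-- ===== Notes on version B (the rewrite author's own statement) =====
-- stated objective: alternative
-- what changed: Replaced explicit enumeration of all 2^c subsets with a dynamic program over (count chosen, running sum); intended as faster, but a timing run could not verify a ratio (A times out at n=16 while B keeps returning), so no speed is claimed.
-- intended difference: On N=0, k=0 (any c) A returns 0 because it never tests the initial empty subset, while B returns 1, the correct count of size-0 subsets summing to 0 (the empty set). — e.g. on Sum_Subset2(0, 0, 2): A returns 0, B returns 1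
import Mathlib
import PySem

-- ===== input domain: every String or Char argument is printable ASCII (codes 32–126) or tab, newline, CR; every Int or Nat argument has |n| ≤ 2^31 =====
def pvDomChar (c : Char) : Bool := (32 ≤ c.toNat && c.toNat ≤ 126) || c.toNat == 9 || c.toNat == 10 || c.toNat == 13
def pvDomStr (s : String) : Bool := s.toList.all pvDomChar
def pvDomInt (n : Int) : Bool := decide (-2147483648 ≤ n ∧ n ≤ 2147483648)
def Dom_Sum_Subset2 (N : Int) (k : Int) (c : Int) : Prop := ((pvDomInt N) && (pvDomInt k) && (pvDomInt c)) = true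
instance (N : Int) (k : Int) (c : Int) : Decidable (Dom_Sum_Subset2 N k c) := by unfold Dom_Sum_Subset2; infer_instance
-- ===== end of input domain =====

-- B replaces A's enumeration of all 2^c subsets by a DP over (count chosen, running sum): a different algorithm of polynomial table size.

-- ===== PORT A =====
-- literal transliteration of A: builds the full subset list, counting each appended subset
-- matching the size/sum condition.  pyGetD is used where Python indexes subset[j] (always in
-- range: j < len(subset)) and subset[-1] (the list is nonempty after the append) — exact there.
def Sum_Subset2 (N : Int) (k : Int) (c : Int) : Int :=
  let arr := PySem.List.pyRange 1 (c + 1) 1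
  let st := arr.foldl (fun (st : Int × List (List Int)) i =>
    let l := st.2.length
    (PySem.List.pyRange 0 (l : Int) 1).foldl (fun (st2 : Int × List (List Int)) j =>
      let subset := st2.2 ++ [PySem.List.pyGetD st2.2 j [] ++ [i]]
      let last := PySem.List.pyGetD subset (-1) []
      if ((last.length : Int) == N) && (last.sum == k) then (st2.1 + 1, subset)
      else (st2.1, subset)) st) ((0 : Int), ([[]] : List (List Int)))
  st.1

-- ===== PORT B =====
-- literal transliteration of Source B: dp maps (count, sum) to the number of subsets of the
-- elements seen so far realising it; each element folds dp.items into a copy of dp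
-- ('new[key] = new.get(key, 0) + v' is Dict.modify key 0 (· + v)).
def Sum_Subset2_alt (N : Int) (k : Int) (c : Int) : Int :=
  let dp := (PySem.List.pyRange 1 (c + 1) 1).foldl
    (fun (dp : PySem.Dict (Int × Int) Int) i =>
      dp.items.foldl (fun (new : PySem.Dict (Int × Int) Int) p =>
        new.modify (p.1.1 + 1, p.1.2 + i) 0 (fun x => x + p.2)) dp)
    (PySem.Dict.empty.insert ((0 : Int), (0 : Int)) 1)
  dp.getD (N, k) 0

-- ===== PRECONDITION & SPEC =====
-- On N=0, k=0 (any c) A returns 0 because it never tests the initial empty subset, while B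
-- returns 1, the correct count of size-0 subsets summing to 0 (the empty set).
def D_Sum_Subset2 (N : Int) (k : Int) (c : Int) : Prop := N = 0 ∧ k = 0
instance (N : Int) (k : Int) (c : Int) : Decidable (D_Sum_Subset2 N k c) := by
  unfold D_Sum_Subset2; infer_instance

def Spec_Sum_Subset2 (N : Int) (k : Int) (c : Int) (out : Int) : Prop :=
  ¬ D_Sum_Subset2 N k c → out = Sum_Subset2_alt N k c
instance (N : Int) (k : Int) (c : Int) (out : Int) : Decidable (Spec_Sum_Subset2 N k c out) := by
  unfold Spec_Sum_Subset2; infer_instance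

def pvDiffWitness_Sum_Subset2 : Int × Int × Int := (0, 0, 2)
def pvDiffWitnessOut_Sum_Subset2 : Int × Int := (0, 1)

-- ===== CLAIM (what is proved, stated in full; the proofs are below) =====
def Claim_unchanged_Sum_Subset2 : Prop := ∀ (N : Int) (k : Int) (c : Int), Dom_Sum_Subset2 N k c → Spec_Sum_Subset2 N k c (Sum_Subset2 N k c)
def Claim_changed_Sum_Subset2 : Prop := Dom_Sum_Subset2 (pvDiffWitness_Sum_Subset2.1) (pvDiffWitness_Sum_Subset2.2.1) (pvDiffWitness_Sum_Subset2.2.2) ∧ D_Sum_Subset2 (pvDiffWitness_Sum_Subset2.1) (pvDiffWitness_Sum_Subset2.2.1) (pvDiffWitness_Sum_Subset2.2.2) ∧ Sum_Subset2 (pvDiffWitness_Sum_Subset2.1) (pvDiffWitness_Sum_Subset2.2.1) (pvDiffWitness_Sum_Subset2.2.2) = pvDiffWitnessOut_Sum_Subset2.1 ∧ Sum_Subset2_alt (pvDiffWitness_Sum_Subset2.1) (pvDiffWitness_Sum_Subset2.2.1) (pvDiffWitness_Sum_Subset2.2.2) = pvDiffWitnessOut_Sum_Subset2.2 ∧ pvDiffWitnessOut_Sum_Subset2.1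 ≠ pvDiffWitnessOut_Sum_Subset2.2
def Claim_exact_Sum_Subset2 : Prop := ∀ (N : Int) (k : Int) (c : Int), Dom_Sum_Subset2 N k c → D_Sum_Subset2 N k c → Sum_Subset2 N k c ≠ Sum_Subset2_alt N k c

-- ===== LEMMAS AND PROOFS =====

def condB (N k : Int) (t : List Int) : Bool := ((t.length : Int) == N) && (t.sum == k)

-- inner loop lemma
theorem inner_fold (i N k : Int) (s0 : List (List Int)) :
    ∀ (m : Nat), m ≤ s0.length → ∀ (r : Int),
    (List.range m).foldl (fun (st2 : Int × List (List Int)) (j : Nat) =>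
      let subset := st2.2 ++ [PySem.List.pyGetD st2.2 (0 + (j : Int)) [] ++ [i]]
      let last := PySem.List.pyGetD subset (-1) []
      if ((last.length : Int) == N) && (last.sum == k) then (st2.1 + 1, subset)
      else (st2.1, subset)) (r, s0)
    = (r + (((s0.take m).map (· ++ [i])).countP (condB N k) : Int),
       s0 ++ (s0.take m).map (· ++ [i])) := by
  intro m
  induction m with
  | zero => intro _ r; simp
  | succ m ih =>
    intro hm r
    have hm' : m < s0.length := by omega
    rw [List.range_succ, List.foldl_append, ih (by omega) r]
    have hget : PySem.List.pyGetD (s0 ++ (s0.take m).map (· ++ [i])) (0 + (m : Int)) [] = s0[m] := by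
      have : (0 : Int) + (m : Int) = ((m : Nat) : Int) := by omega
      rw [this, PySem.List.pyGetD_natCast]
      rw [List.getD_eq_getElem?_getD, List.getElem?_append_left hm', List.getElem?_eq_getElem hm']
      rfl
    have htake : s0.take (m + 1) = s0.take m ++ [s0[m]] := by
      rw [List.take_add_one, List.getElem?_eq_getElem hm']; rfl
    simp only [List.foldl_cons, List.foldl_nil, hget]
    rw [htake]
    have hlast : PySem.List.pyGetD ((s0 ++ (s0.take m).map (· ++ [i])) ++ [s0[m] ++ [i]]) (-1) []
        = s0[m] ++ [i] := PySem.List.pyGetD_neg_one_append_singleton _ _ _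
    rw [hlast]
    by_cases hc : ((((s0[m] ++ [i]).length : Int) == N) && ((s0[m] ++ [i]).sum == k)) = true
    · rw [if_pos hc]
      simp only [List.map_append, List.map_cons, List.map_nil, List.countP_append,
        List.countP_cons, List.countP_nil, condB, hc]
      refine Prod.ext ?_ (by simp [List.append_assoc])
      push_cast; ring
    · rw [if_neg hc]
      simp only [List.map_append, List.map_cons, List.map_nil, List.countP_append,
        List.countP_cons, List.countP_nil, condB]
      rw [if_neg hc]
      refine Prod.ext ?_ (by simp [List.append_assoc])
      push_cast; ring

def subsEnum (xs : List Int) : List (List Int) :=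
  xs.foldl (fun acc i => acc ++ acc.map (· ++ [i])) [[]]

def condA (N k : Int) (t : List Int) : Bool := (!t.isEmpty) && condB N k t

theorem subsEnum_snoc (xs : List Int) (i : Int) :
    subsEnum (xs ++ [i]) = subsEnum xs ++ (subsEnum xs).map (· ++ [i]) := by
  simp [subsEnum]

theorem A_char (N k : Int) (p : List Int) :
    p.foldl (fun (st : Int × List (List Int)) i =>
      let l := st.2.length
      (PySem.List.pyRange 0 (l : Int) 1).foldl (fun (st2 : Int × List (List Int)) j =>
        let subset := st2.2 ++ [PySem.List.pyGetD st2.2 j [] ++ [i]]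
        let last := PySem.List.pyGetD subset (-1) []
        if ((last.length : Int) == N) && (last.sum == k) then (st2.1 + 1, subset)
        else (st2.1, subset)) st) ((0 : Int), ([[]] : List (List Int)))
    = (((subsEnum p).countP (condA N k) : Int), subsEnum p) := by
  induction p using List.reverseRecOn with
  | nil => simp [subsEnum, condA]
  | append_singleton p i ih =>
    rw [List.foldl_append, ih]
    simp only [List.foldl_cons, List.foldl_nil]
    rw [PySem.List.pyRange_one]
    have h1 : ((((subsEnum p).length : Int) - 0).toNat) = (subsEnum p).length := by omega
    rw [h1, List.foldl_map]
    rw [inner_fold i N k (subsEnum p) (subsEnum p).length (le_refl _)]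
    rw [List.take_length, subsEnum_snoc]
    have hcnt : List.countP (condA N k) (subsEnum p ++ (subsEnum p).map (· ++ [i]))
        = List.countP (condA N k) (subsEnum p) + List.countP (condB N k) ((subsEnum p).map (· ++ [i])) := by
      rw [List.countP_append]
      congr 1
      apply List.countP_congr
      intro a ha
      rcases List.mem_map.mp ha with ⟨t, _, rfl⟩
      simp [condA]
    rw [hcnt]
    push_cast
    ring_nf

def lkAssoc (L : List ((Int × Int) × Int)) (key : Int × Int) : Int :=
  match L.find? (fun p => p.1 == key) with
  | some p => p.2
  | none => 0

theorem lkAssoc_of_not_mem (L : List ((Int × Int) × Int)) (key : Int × Int)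
    (h : key ∉ L.map (·.1)) : lkAssoc L key = 0 := by
  unfold lkAssoc
  rw [List.find?_eq_none.mpr ?_]
  intro x hx
  simp only [beq_iff_eq]
  intro he
  exact h (List.mem_map.mpr ⟨x, hx, he⟩)

theorem find?_assoc_nodup (L : List ((Int × Int) × Int)) (key : Int × Int) (v : Int)
    (hnd : (L.map (·.1)).Nodup) (hmem : (key, v) ∈ L) :
    L.find? (fun p => p.1 == key) = some (key, v) := by
  induction L with
  | nil => simp at hmem
  | cons q rest ih =>
    simp only [List.map_cons, List.nodup_cons] at hnd
    rcases List.mem_cons.mp hmem with rfl | hmem'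
    · simp [List.find?]
    · have hne : q.1 ≠ key := by
        intro he
        exact hnd.1 (he ▸ List.mem_map.mpr ⟨(key, v), hmem', rfl⟩)
      rw [List.find?_cons_of_neg (by simpa using hne)]
      exact ih hnd.2 hmem'

theorem lkAssoc_items (d : PySem.Dict (Int × Int) Int) (hnd : d.keys.Nodup) (key : Int × Int) :
    lkAssoc d.items key = d.getD key 0 := by
  cases h : d.get? key with
  | none =>
    rw [PySem.Dict.getD_eq_get?_getD, h]
    simp only [Option.getD_none]
    apply lkAssoc_of_not_mem
    intro hmem
    rw [PySem.Dict.get?_eq_none_iff_not_mem_keys] at h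
    exact h (by simpa [PySem.Dict.keys] using hmem)
  | some v =>
    have hmem := PySem.Dict.mem_items_of_get?_eq_some _ h
    unfold lkAssoc
    rw [find?_assoc_nodup _ _ v (by simpa [PySem.Dict.keys] using hnd) hmem]
    rw [PySem.Dict.getD_eq_get?_getD, h]
    rfl

theorem fold_modify_getD (i : Int) (L : List ((Int × Int) × Int)) :
    ∀ (d : PySem.Dict (Int × Int) Int) (q : Int × Int), (L.map (·.1)).Nodup →
    (L.foldl (fun new p => new.modify (p.1.1 + 1, p.1.2 + i) 0 (fun x => x + p.2)) d).getD q 0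
      = d.getD q 0 + lkAssoc L (q.1 - 1, q.2 - i) := by
  induction L with
  | nil => intro d q _; simp [lkAssoc]
  | cons p rest ih =>
    intro d q hnd
    simp only [List.map_cons, List.nodup_cons] at hnd
    simp only [List.foldl_cons]
    rw [ih _ _ hnd.2]
    rw [PySem.Dict.getD_modify]
    by_cases hq : q = (p.1.1 + 1, p.1.2 + i)
    · have hkey : (q.1 - 1, q.2 - i) = p.1 := by
        subst hq; exact Prod.ext (by simp) (by simp)
      rw [if_pos hq, hkey]
      have h1 : lkAssoc (p :: rest) p.1 = p.2 := by unfold lkAssoc; simp [List.find?]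
      have h2 : lkAssoc rest p.1 = 0 := lkAssoc_of_not_mem _ _ hnd.1
      rw [h1, h2, hq]
      ring
    · have hkey : (q.1 - 1, q.2 - i) ≠ p.1 := by
        intro he
        apply hq
        have h1 : q.1 - 1 = p.1.1 := by rw [← he]
        have h2 : q.2 - i = p.1.2 := by rw [← he]
        exact Prod.ext (by omega) (by omega)
      rw [if_neg hq]
      have h3 : lkAssoc (p :: rest) (q.1 - 1, q.2 - i) = lkAssoc rest (q.1 - 1, q.2 - i) := by
        unfold lkAssoc
        rw [List.find?_cons_of_neg (by simpa using fun he => hkey he.symm)]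
      rw [h3]

theorem B_nodup (p : List Int) :
    ∀ d : PySem.Dict (Int × Int) Int, d.keys.Nodup →
    (p.foldl (fun (dp : PySem.Dict (Int × Int) Int) i =>
      dp.items.foldl (fun new pr => new.modify (pr.1.1 + 1, pr.1.2 + i) 0 (fun x => x + pr.2)) dp) d).keys.Nodup := by
  induction p with
  | nil => intro d h; simpa using h
  | cons i rest ih =>
    intro d h
    simp only [List.foldl_cons]
    exact ih _ (PySem.Dict.nodup_keys_foldl_modify_key d.items
      (fun pr => (pr.1.1 + 1, pr.1.2 + i)) 0 (fun _ pr => fun x => x + pr.2) d h)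

theorem condB_snoc (q : Int × Int) (i : Int) (t : List Int) :
    condB q.1 q.2 (t ++ [i]) = condB (q.1 - 1) (q.2 - i) t := by
  rw [Bool.eq_iff_iff]
  simp only [condB, Bool.and_eq_true, beq_iff_eq, List.length_append, List.sum_append,
    List.length_cons, List.length_nil, List.sum_cons, List.sum_nil]
  push_cast
  omega

theorem B_char (p : List Int) (q : Int × Int) :
    (p.foldl (fun (dp : PySem.Dict (Int × Int) Int) i =>
      dp.items.foldl (fun new pr => new.modify (pr.1.1 + 1, pr.1.2 + i) 0 (fun x => x + pr.2)) dp)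
      (PySem.Dict.empty.insert ((0 : Int), (0 : Int)) 1)).getD q 0
    = ((subsEnum p).countP (condB q.1 q.2) : Int) := by
  induction p using List.reverseRecOn generalizing q with
  | nil =>
    rw [List.foldl_nil, PySem.Dict.getD_insert]
    by_cases hq : q = ((0 : Int), (0 : Int))
    · subst hq
      simp [subsEnum, condB]
    · rw [if_neg hq]
      have hc : condB q.1 q.2 [] = false := by
        rw [Bool.eq_false_iff]
        simp only [condB, List.length_nil, List.sum_nil, Nat.cast_zero]
        intro h1
        simp only [Bool.and_eq_true, beq_iff_eq] at h1
        exact hq (Prod.ext h1.1.symm h1.2.symm)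
      simp [subsEnum, hc, PySem.Dict.getD_empty]
  | append_singleton p i ih =>
    rw [List.foldl_append]
    simp only [List.foldl_cons, List.foldl_nil]
    have hnd := B_nodup p (PySem.Dict.empty.insert ((0 : Int), (0 : Int)) 1)
      (PySem.Dict.nodup_keys_insert _ _ _ PySem.Dict.nodup_keys_empty)
    rw [fold_modify_getD i _ _ q (by simpa [PySem.Dict.keys] using hnd)]
    rw [lkAssoc_items _ hnd]
    rw [ih q, ih (q.1 - 1, q.2 - i)]
    rw [subsEnum_snoc, List.countP_append, List.countP_map]
    have : List.countP (condB q.1 q.2 ∘ (· ++ [i])) (subsEnum p)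
        = List.countP (condB (q.1 - 1) (q.2 - i)) (subsEnum p) := by
      apply List.countP_congr
      intro t _
      simp only [Function.comp_apply, condB_snoc q i t]
    rw [this]
    push_cast
    ring

theorem nil_mem_subsEnum (xs : List Int) : [] ∈ subsEnum xs := by
  induction xs using List.reverseRecOn with
  | nil => simp [subsEnum]
  | append_singleton xs i ih => rw [subsEnum_snoc]; exact List.mem_append_left _ ih

theorem Sum_Subset2_eq_countA (N k c : Int) :
    Sum_Subset2 N k c = ((subsEnum (PySem.List.pyRange 1 (c + 1) 1)).countP (condA N k) : Int) := by
  simp only [Sum_Subset2]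
  rw [A_char]

theorem Sum_Subset2_alt_eq_countB (N k c : Int) :
    Sum_Subset2_alt N k c = ((subsEnum (PySem.List.pyRange 1 (c + 1) 1)).countP (condB N k) : Int) := by
  simp only [Sum_Subset2_alt]
  exact B_char (PySem.List.pyRange 1 (c + 1) 1) (N, k)

-- ===== VERDICT (by name: the statement is the Claim_ definition above) =====
theorem Sum_Subset2_spec : Claim_unchanged_Sum_Subset2 := by
  intro N k c _ hD
  unfold D_Sum_Subset2 at hD
  show Sum_Subset2 N k c = Sum_Subset2_alt N k c
  rw [Sum_Subset2_eq_countA, Sum_Subset2_alt_eq_countB]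
  congr 1
  apply List.countP_congr
  intro t _
  cases t with
  | nil =>
    have hB : condB N k [] = false := by
      rw [Bool.eq_false_iff]
      simp only [condB, List.length_nil, List.sum_nil, Nat.cast_zero]
      intro h
      simp only [Bool.and_eq_true, beq_iff_eq] at h
      exact hD ⟨h.1.symm, h.2.symm⟩
    simp [condA, hB]
  | cons x ts => simp [condA]

theorem Sum_Subset2_changed : Claim_changed_Sum_Subset2 := by
  unfold Claim_changed_Sum_Subset2; decide

theorem Sum_Subset2_tight : Claim_exact_Sum_Subset2 := by
  intro N k c _ hD
  obtain ⟨rfl, rfl⟩ := hD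
  rw [Sum_Subset2_eq_countA, Sum_Subset2_alt_eq_countB]
  have hA : (subsEnum (PySem.List.pyRange 1 (c + 1) 1)).countP (condA 0 0) = 0 := by
    apply List.countP_eq_zero.mpr
    intro t _
    cases t with
    | nil => simp [condA]
    | cons x ts =>
      simp only [condA, condB, List.isEmpty_cons, Bool.not_false, Bool.true_and,
        List.length_cons, Bool.and_eq_true, beq_iff_eq]
      intro h
      push_cast at h
      omega
  have hB : 0 < (subsEnum (PySem.List.pyRange 1 (c + 1) 1)).countP (condB 0 0) := by
    rw [List.countP_pos_iff]
    exact ⟨[], nil_mem_subsEnum _, by simp [condB]⟩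
  rw [hA]
  intro h
  omega
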